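-- pv_equiv track=rewrite | github.com/kracr/rcone-qa-mmkg | model/create_queries.py | ho_multimodal_answer_gen
-- ===== SOURCE A (Python) =====
-- def ho_multimodal_answer_gen(answers, multimodal_entity_dict, multimodal_subentities):
--     multimodal_answers = set()
--     for enti in multimodal_entity_dict.keys():
--         present = False
--         for subent in multimodal_entity_dict[enti]:
--             if subent in answers:
--                 present = True
--                 break
--         if present:
--             multimodal_answers.add(enti)
--     return {'all_answers': answers, 'multimodal_answers': multimodal_answers, 'other_answers': answers.difference(set(multimodal_subentities)), 'subentities': set(multimodal_subentities).intersection(answers)}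
-- ===== SOURCE B (Python) =====
-- def ho_multimodal_answer_gen(answers, multimodal_entity_dict, multimodal_subentities):
--     # Inverted index: subentity -> set of entity keys that list it.
--     index = {}
--     for enti, subents in multimodal_entity_dict.items():
--         for s in subents:
--             index.setdefault(s, set()).add(enti)
--     # Answer-driven pass: union in the entities hit by each answer.
--     hit = set()
--     for a in answers:
--         hit |= index.get(a, set())
--     # keep the entity keys that were hit
--     multimodal_answers = {e for e in multimodal_entity_dict if e in hit}
--     sub_set = set(multimodal_subentities)
--     return {'all_answers': answers,
--             'multimodal_answers': multimodal_answers,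
--             'other_answers': answers - sub_set,
--             'subentities': sub_set & answers}
-- ===== Notes on version B (the rewrite author's own statement) =====
-- stated objective: alternative
-- what changed: B replaces A's per-entity scan of each subentity list with an inverted index (subentity -> set of entity keys) built in one pass, then computes multimodal_answers answer-driven by unioning index lookups per answer; the other three set-algebra fields are computed once as in A.
import Mathlib
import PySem

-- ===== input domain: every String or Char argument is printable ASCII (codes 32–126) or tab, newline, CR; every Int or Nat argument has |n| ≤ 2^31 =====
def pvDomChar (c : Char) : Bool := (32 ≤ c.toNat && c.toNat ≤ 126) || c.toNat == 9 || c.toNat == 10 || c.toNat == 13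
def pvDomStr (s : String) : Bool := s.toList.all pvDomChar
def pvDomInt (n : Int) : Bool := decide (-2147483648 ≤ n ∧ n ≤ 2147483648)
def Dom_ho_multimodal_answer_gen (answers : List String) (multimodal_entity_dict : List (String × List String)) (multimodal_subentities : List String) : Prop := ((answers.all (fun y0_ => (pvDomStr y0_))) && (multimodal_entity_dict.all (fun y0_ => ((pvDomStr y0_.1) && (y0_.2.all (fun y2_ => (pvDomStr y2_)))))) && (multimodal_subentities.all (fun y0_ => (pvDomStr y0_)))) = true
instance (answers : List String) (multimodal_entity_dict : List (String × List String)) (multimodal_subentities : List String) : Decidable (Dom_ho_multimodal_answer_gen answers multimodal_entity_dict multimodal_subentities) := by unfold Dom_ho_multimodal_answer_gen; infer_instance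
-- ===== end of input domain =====

-- B builds an inverted index (subentity -> set of entity keys) in one pass and computes
-- multimodal_answers answer-driven by unioning index lookups, instead of A's per-entity scan
-- (alternative algorithm, same cost). Set-valued fields are compared as finite sets by the
-- harness; the proven equality is on the ports' canonical first-insertion-order representations.

-- ===== PORT A =====
-- inner loop 'for subent in …: if subent in answers: present = True; break'
def pvPresentA (answers : List String) : List String → Bool
  | [] => false
  | s :: rest => if PySem.Set.contains answers s then true else pvPresentA answers rest

def ho_multimodal_answer_gen (answers : List String) (multimodal_entity_dict : List (String × List String)) (multimodal_subentities : List String) : List (String × List String) :=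
  let d := PySem.Dict.ofList multimodal_entity_dict
  let multimodal_answers := d.keys.foldl
    (fun acc enti => if pvPresentA answers (d.getD enti []) then PySem.Set.add acc enti else acc)
    PySem.Set.empty
  [("all_answers", answers),
   ("multimodal_answers", multimodal_answers),
   ("other_answers", PySem.Set.diff answers (PySem.Set.ofList multimodal_subentities)),
   ("subentities", PySem.Set.inter (PySem.Set.ofList multimodal_subentities) answers)]

-- ===== PORT B =====
def ho_multimodal_answer_gen_alt (answers : List String) (multimodal_entity_dict : List (String × List String)) (multimodal_subentities : List String) : List (String × List String) :=
  let d := PySem.Dict.ofList multimodal_entity_dict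
  -- index = {}; for enti, subents in d.items(): for s in subents: index.setdefault(s, set()).add(enti)
  let index : PySem.Dict String (PySem.Set String) := d.items.foldl
    (fun idx kv => kv.2.foldl
      (fun idx s => idx.insert s (PySem.Set.add (idx.getD s PySem.Set.empty) kv.1)) idx)
    PySem.Dict.empty
  -- hit = set(); for a in answers: hit |= index.get(a, set())
  let hit := answers.foldl (fun h a => PySem.Set.update h (index.getD a PySem.Set.empty)) PySem.Set.empty
  -- {e for e in d if e in hit}
  let multimodal_answers := PySem.Set.ofList (d.keys.filter (fun e => PySem.Set.contains hit e))
  [("all_answers", answers),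
   ("multimodal_answers", multimodal_answers),
   ("other_answers", PySem.Set.diff answers (PySem.Set.ofList multimodal_subentities)),
   ("subentities", PySem.Set.inter (PySem.Set.ofList multimodal_subentities) answers)]

-- ===== PRECONDITION & SPEC =====
def Spec_ho_multimodal_answer_gen (answers : List String) (multimodal_entity_dict : List (String × List String)) (multimodal_subentities : List String) (out : List (String × List String)) : Prop := out = ho_multimodal_answer_gen_alt answers multimodal_entity_dict multimodal_subentities
instance (answers : List String) (multimodal_entity_dict : List (String × List String)) (multimodal_subentities : List String) (out : List (String × List String)) : Decidable (Spec_ho_multimodal_answer_gen answers multimodal_entity_dict multimodal_subentities out) := by unfold Spec_ho_multimodal_answer_gen; infer_instance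

-- ===== CLAIM (what is proved, stated in full; the proofs are below) =====
def Claim_equal_ho_multimodal_answer_gen : Prop := ∀ (answers : List String) (multimodal_entity_dict : List (String × List String)) (multimodal_subentities : List String), Dom_ho_multimodal_answer_gen answers multimodal_entity_dict multimodal_subentities → Spec_ho_multimodal_answer_gen answers multimodal_entity_dict multimodal_subentities (ho_multimodal_answer_gen answers multimodal_entity_dict multimodal_subentities)

-- ===== LEMMAS AND PROOFS =====

-- A's break-scan is List.any
theorem pvPresentA_eq_any (answers : List String) (l : List String) :
    pvPresentA answers l = l.any (fun s => PySem.Set.contains answers s) := by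
  induction l with
  | nil => rfl
  | cons s rest ih => by_cases h : PySem.Set.contains answers s <;> simp [pvPresentA, ih]

-- A's conditional-add fold over a fresh nodup list is List.filter
theorem foldl_add_filter (p : String → Bool) :
    ∀ (l acc : List String), l.Nodup → (∀ k ∈ l, k ∉ acc) →
      l.foldl (fun acc k => if p k then PySem.Set.add acc k else acc) acc = acc ++ l.filter p := by
  intro l
  induction l with
  | nil => intro acc _ _; simp
  | cons k rest ih =>
    intro acc hnd hacc
    have hk : k ∉ rest := (List.nodup_cons.mp hnd).1
    have hndr : rest.Nodup := (List.nodup_cons.mp hnd).2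
    simp only [List.foldl_cons]
    by_cases hp : p k
    · rw [if_pos hp, PySem.Set.add_of_not_mem (hacc k (by simp))]
      rw [ih (acc ++ [k]) hndr (by
        intro j hj
        simp only [List.mem_append, List.mem_singleton]
        rintro (h | rfl)
        · exact hacc j (by simp [hj]) h
        · exact hk hj)]
      simp [List.filter_cons_of_pos hp]
    · rw [if_neg hp, ih acc hndr (fun j hj => hacc j (by simp [hj]))]
      simp [List.filter_cons_of_neg hp]

-- membership through B's union loop
theorem mem_foldl_update (f : String → List String) :
    ∀ (l : List String) (h : List String) (x : String),
      x ∈ l.foldl (fun h a => PySem.Set.update h (f a)) h ↔ x ∈ h ∨ ∃ a ∈ l, x ∈ f a := by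
  intro l
  induction l with
  | nil => intro h x; simp
  | cons a rest ih =>
    intro h x
    simp only [List.foldl_cons]
    rw [ih]
    simp [PySem.Set.mem_update]
    tauto

-- membership through the inner index-building loop (one entity's subentity list)
theorem idx_inner (e t x : String) :
    ∀ (subs : List String) (idx : PySem.Dict String (PySem.Set String)),
      x ∈ (subs.foldl (fun idx s => idx.insert s (PySem.Set.add (idx.getD s PySem.Set.empty) e)) idx).getD t PySem.Set.empty
        ↔ x ∈ idx.getD t PySem.Set.empty ∨ (x = e ∧ t ∈ subs) := by
  intro subs
  induction subs with
  | nil => intro idx; simp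
  | cons s rest ih =>
    intro idx
    simp only [List.foldl_cons]
    rw [ih]
    rw [PySem.Dict.getD_insert]
    by_cases h : t = s
    · subst h
      simp [PySem.Set.mem_add]
      tauto
    · simp [h]

-- membership through the full index build
theorem idx_outer (t x : String) :
    ∀ (L : List (String × List String)) (idx : PySem.Dict String (PySem.Set String)),
      x ∈ (L.foldl (fun idx kv => kv.2.foldl
            (fun idx s => idx.insert s (PySem.Set.add (idx.getD s PySem.Set.empty) kv.1)) idx) idx).getD t PySem.Set.empty
        ↔ x ∈ idx.getD t PySem.Set.empty ∨ ∃ kv ∈ L, x = kv.1 ∧ t ∈ kv.2 := by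
  intro L
  induction L with
  | nil => intro idx; simp
  | cons kv rest ih =>
    intro idx
    simp only [List.foldl_cons]
    rw [ih, idx_inner]
    simp
    tauto

-- ===== VERDICT (by name: the statement is the Claim_ definition above) =====
theorem ho_multimodal_answer_gen_spec : Claim_equal_ho_multimodal_answer_gen := by
  intro answers med msub _
  unfold Spec_ho_multimodal_answer_gen ho_multimodal_answer_gen ho_multimodal_answer_gen_alt
  simp only []
  set d := PySem.Dict.ofList med with hdd
  set index := d.items.foldl
    (fun idx kv => kv.2.foldl
      (fun idx s => idx.insert s (PySem.Set.add (idx.getD s PySem.Set.empty) kv.1)) idx)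
    PySem.Dict.empty with hindex
  set hit := answers.foldl (fun h a => PySem.Set.update h (index.getD a PySem.Set.empty))
    PySem.Set.empty with hhit
  have hnd : d.keys.Nodup := PySem.Dict.nodup_keys_ofList med
  have hitems := PySem.Dict.items_eq_map_keys d hnd ([] : List String)
  have key : ∀ k ∈ d.keys, pvPresentA answers (d.getD k []) = PySem.Set.contains hit k := by
    intro k hkmem
    rw [Bool.eq_iff_iff, pvPresentA_eq_any, List.any_eq_true]
    constructor
    · -- A's per-entity hit ⇒ k ∈ hit
      rintro ⟨s, hs, hcs⟩
      have hsans : s ∈ answers := (PySem.Set.contains_iff _ _).mp hcs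
      rw [PySem.Set.contains_iff, hhit, mem_foldl_update]
      refine Or.inr ⟨s, hsans, ?_⟩
      rw [hindex, idx_outer]
      refine Or.inr ⟨(k, d.getD k []), ?_, rfl, hs⟩
      rw [hitems]
      exact List.mem_map.mpr ⟨k, hkmem, rfl⟩
    · -- k ∈ hit ⇒ some subentity of k is an answer
      intro hc
      have hmem := (PySem.Set.contains_iff _ _).mp hc
      rw [hhit, mem_foldl_update] at hmem
      rcases hmem with h | ⟨a, ha, hk⟩
      · simp [PySem.Set.empty] at h
      · rw [hindex, idx_outer] at hk
        rcases hk with h | ⟨kv, hkv, rfl, hak⟩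
        · simp [PySem.Dict.getD_empty] at h
        · rw [hitems] at hkv
          rcases List.mem_map.mp hkv with ⟨k', _, hEq⟩
          have hv : kv.2 = d.getD kv.1 [] := by cases hEq; rfl
          exact ⟨a, hv ▸ hak, (PySem.Set.contains_iff _ _).mpr ha⟩
  rw [foldl_add_filter _ _ _ hnd (by intro j _ hj; simp [PySem.Set.empty] at hj)]
  rw [List.filter_congr key]
  have hself : PySem.Set.ofList (List.filter (fun e => PySem.Set.contains hit e) d.keys)
      = List.filter hit.contains d.keys :=
    PySem.Set.ofList_eq_self_of_nodup _ (List.Nodup.filter _ hnd)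
  rw [hself]
  simp [PySem.Set.empty]
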